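-- pv_equiv track=rewrite | github.com/Arnaud1404/AdventOfCode2024 | Day9/day9.py | find_file_bounds
-- ===== SOURCE A (Python) =====
-- from typing import List, Tuple
--
-- def find_file_bounds(data: List[str], file_id: int) -> Tuple[int, int]:
--     file_str = str(file_id)
--     start = -1
--     size = 0
--
--     for i, char in enumerate(data):
--         if char == file_str:
--             if start == -1:
--                 start = i
--             size += 1
--
--     return start, size
-- ===== SOURCE B (Python) =====
-- from typing import List, Tuple
--
-- def find_file_bounds(data: List[str], file_id: int) -> Tuple[int, int]:
--     file_str = str(file_id)
--     try:
--         return data.index(file_str), data.count(file_str)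
--     except ValueError:
--         return -1, 0
-- ===== Notes on version B (the rewrite author's own statement) =====
-- stated objective: idiomatic
-- what changed: Replaces the manual enumerate loop with first-match guard by the library's first-index search (list.index, ValueError caught as the -1 sentinel) plus a separate full count pass (list.count).
import Mathlib
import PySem

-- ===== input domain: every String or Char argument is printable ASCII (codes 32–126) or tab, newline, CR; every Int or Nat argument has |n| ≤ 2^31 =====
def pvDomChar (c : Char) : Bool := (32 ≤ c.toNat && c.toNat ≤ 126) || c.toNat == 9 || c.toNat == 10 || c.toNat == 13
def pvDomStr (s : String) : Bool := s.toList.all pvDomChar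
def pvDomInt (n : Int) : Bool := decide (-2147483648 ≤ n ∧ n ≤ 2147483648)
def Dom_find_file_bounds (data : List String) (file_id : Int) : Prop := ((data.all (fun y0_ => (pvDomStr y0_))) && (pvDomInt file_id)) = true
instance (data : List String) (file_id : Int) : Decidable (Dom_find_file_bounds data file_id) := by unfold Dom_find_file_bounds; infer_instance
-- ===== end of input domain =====

-- B replaces A's single combined scan (first-match guard + running counter) by the
-- library's first-index search plus a separate count pass; same values, idiomatic.

-- ===== PORT A =====
-- literal port of A: one enumerate loop carrying (start, size)
def find_file_bounds (data : List String) (file_id : Int) : Int × Int :=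
  let file_str := PySem.Int.toStr file_id
  let st := (PySem.List.enumerate data).foldl
    (fun (st : Int × Int) (p : Int × String) =>
      if p.2 == file_str then
        (if st.1 == -1 then p.1 else st.1, st.2 + 1)
      else st)
    (-1, 0)
  st

-- ===== PORT B =====
-- literal port of B: data.index(file_str) (ValueError → (-1,0) sentinel) and data.count(file_str)
def find_file_bounds_alt (data : List String) (file_id : Int) : Int × Int :=
  let file_str := PySem.Int.toStr file_id
  match PySem.List.index? data file_str with
  | some k => ((k : Int), (PySem.List.count data file_str : Int))
  | none => (-1, 0)

-- ===== PRECONDITION & SPEC =====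
def Spec_find_file_bounds (data : List String) (file_id : Int) (out : Int × Int) : Prop := out = find_file_bounds_alt data file_id
instance (data : List String) (file_id : Int) (out : Int × Int) : Decidable (Spec_find_file_bounds data file_id out) := by unfold Spec_find_file_bounds; infer_instance

-- ===== CLAIM (what is proved, stated in full; the proofs are below) =====
def Claim_equal_find_file_bounds : Prop := ∀ (data : List String) (file_id : Int), Dom_find_file_bounds data file_id → Spec_find_file_bounds data file_id (find_file_bounds data file_id)

-- ===== LEMMAS AND PROOFS =====

-- once start has been set (a ≠ -1), the loop only increments the counter
theorem pv_loop_after_found (fs : String) (xs : List String) (s a b : Int) (ha : a ≠ -1) :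
    (PySem.List.enumerate xs s).foldl
      (fun (st : Int × Int) (p : Int × String) =>
        if p.2 == fs then (if st.1 == -1 then p.1 else st.1, st.2 + 1) else st)
      (a, b) = (a, b + (xs.count fs : Int)) := by
  induction xs generalizing s b with
  | nil => simp [PySem.List.enumerate_nil]
  | cons x xs ih =>
    rw [PySem.List.enumerate_cons]
    by_cases hx : x = fs
    · simp only [List.foldl_cons, hx, beq_self_eq_true, if_true]
      have : (a == -1) = false := by simpa using ha
      rw [this]
      simp only [Bool.false_eq_true, if_false]
      rw [ih (s + 1) (b + 1)]
      simp
      ring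
    · have hbe : (x == fs) = false := by simpa using hx
      simp only [List.foldl_cons, hbe, Bool.false_eq_true, if_false]
      rw [ih (s + 1) b]
      simp [hx]

-- the full loop from the initial state computes B's (index, count) pair
theorem pv_loop_eq (fs : String) (xs : List String) (s : Int) (hs : 0 ≤ s) :
    (PySem.List.enumerate xs s).foldl
      (fun (st : Int × Int) (p : Int × String) =>
        if p.2 == fs then (if st.1 == -1 then p.1 else st.1, st.2 + 1) else st)
      (-1, 0) =
    (match PySem.List.index? xs fs with
     | some k => (s + (k : Int), (xs.count fs : Int))
     | none => (-1, 0)) := by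
  induction xs generalizing s with
  | nil => simp [PySem.List.enumerate_nil, PySem.List.index?]
  | cons x xs ih =>
    rw [PySem.List.enumerate_cons]
    by_cases hx : x = fs
    · simp only [List.foldl_cons, hx, beq_self_eq_true, if_true]
      rw [pv_loop_after_found fs xs (s + 1) s (0 + 1) (by omega)]
      rw [PySem.List.index?_cons_self]
      simp
      omega
    · have hbe : (x == fs) = false := by simpa using hx
      simp only [List.foldl_cons, hbe, Bool.false_eq_true, if_false]
      rw [ih (s + 1) (by omega)]
      rw [PySem.List.index?_cons_of_ne xs hx]
      cases h : PySem.List.index? xs fs with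
      | none => simp
      | some k =>
        simp [hx]
        ring

-- ===== VERDICT (by name: the statement is the Claim_ definition above) =====
theorem find_file_bounds_spec : Claim_equal_find_file_bounds := by
  intro data file_id _
  unfold Spec_find_file_bounds find_file_bounds find_file_bounds_alt
  simp only []
  rw [pv_loop_eq (PySem.Int.toStr file_id) data 0 (le_refl 0)]
  cases h : PySem.List.index? data (PySem.Int.toStr file_id) with
  | none => simp
  | some k => simp [PySem.List.count_eq]
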